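-- pv_equiv track=rewrite | github.com/Gex4me/PythonLabs | lab1.py | remove_even_after_max_no_std
-- ===== SOURCE A (Python) =====
-- def remove_even_after_max_no_std(lst):
--     # Эта функция удалит четные элементы из списка, которые находятся после максимального элемента, не используя стандартные функции
--     # Найдем максимальный элемент и его индекс
--     max_elem = lst[0]
--     max_index = 0
--     for i in range(1, len(lst)):
--         if lst[i] > max_elem:
--             max_elem = lst[i]
--             max_index = i
--     # Создадим новый список, удалив четные элементы после максимального
--     new_lst = []  # Создадим пустой список
--     for i in range(len(lst)):  # Перебор всех элементов в списке
--         if i <= max_index or (i > max_index and lst[i] % 2 != 0):  # Если элемент до максимального или нечетный после максимального, добавим его в новый список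
--             new_lst.append(lst[i])
--     return new_lst
-- ===== SOURCE B (Python) =====
-- def remove_even_after_max_no_std(lst):
--     # One online pass: keep a committed prefix ending at the running maximum and
--     # two deferred buffers for elements seen after it (all of them / odd ones only).
--     cur = lst[0]
--     out = [cur]
--     buf = []
--     odd = []
--     for x in lst[1:]:
--         if x > cur:
--             cur = x
--             out += buf
--             out.append(x)
--             buf = []
--             odd = []
--         else:
--             buf.append(x)
--             if x % 2 != 0:
--                 odd.append(x)
--     return out + odd
-- ===== Notes on version B (the rewrite author's own statement) =====
-- stated objective: alternative
-- what changed: Replaces A's two loops (an index scan to find the max index, then a full rebuild pass keyed on index comparisons) with a single online pass that commits elements up to the running maximum and defers later elements into a buffer plus an odd-only buffer, flushing the buffer whenever a new maximum appears.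
import Mathlib
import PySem

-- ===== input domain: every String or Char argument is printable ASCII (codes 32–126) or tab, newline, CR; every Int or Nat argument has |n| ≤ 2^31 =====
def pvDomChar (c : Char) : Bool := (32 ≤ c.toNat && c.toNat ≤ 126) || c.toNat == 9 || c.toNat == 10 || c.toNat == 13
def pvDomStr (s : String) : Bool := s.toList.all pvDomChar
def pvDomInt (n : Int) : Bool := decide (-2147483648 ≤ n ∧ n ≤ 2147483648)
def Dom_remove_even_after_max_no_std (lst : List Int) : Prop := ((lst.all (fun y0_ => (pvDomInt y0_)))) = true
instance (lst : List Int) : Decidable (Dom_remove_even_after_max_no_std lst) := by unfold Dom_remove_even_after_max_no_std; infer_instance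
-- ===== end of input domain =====

-- B replaces A's two index-based loops (find the max index, then rebuild by an index test)
-- with one online pass keeping a committed prefix and deferred buffers (objective: alternative).

-- ===== PORT A =====
def remove_even_after_max_no_std (lst : List Int) : List Int :=
  let s := (PySem.List.pyRange 1 (lst.length : Int) 1).foldl
    (fun (s : Int × Int) i =>
      if PySem.List.pyGetD lst i 0 > s.1 then (PySem.List.pyGetD lst i 0, i) else s)
    (PySem.List.pyGetD lst 0 0, 0)
  (PySem.List.pyRange 0 (lst.length : Int) 1).foldl
    (fun (acc : List Int) i =>
      if i ≤ s.2 ∨ (i > s.2 ∧ PySem.Int.mod (PySem.List.pyGetD lst i 0) 2 ≠ 0)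
      then acc ++ [PySem.List.pyGetD lst i 0] else acc) []

-- ===== PORT B =====
def remove_even_after_max_no_std_alt (lst : List Int) : List Int :=
  let cur0 := PySem.List.pyGetD lst 0 0
  let s := (PySem.List.slice lst (some 1) none).foldl
    (fun (s : Int × List Int × List Int × List Int) x =>
      if x > s.1 then (x, s.2.1 ++ s.2.2.1 ++ [x], ([] : List Int), ([] : List Int))
      else (s.1, s.2.1, s.2.2.1 ++ [x],
        if PySem.Int.mod x 2 ≠ 0 then s.2.2.2 ++ [x] else s.2.2.2))
    (cur0, ([cur0], ([] : List Int), ([] : List Int)))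
  s.2.1 ++ s.2.2.2

-- ===== PRECONDITION & SPEC =====
-- Python A raises IndexError (lst[0]) on the empty list (and so does B); Pre_ excludes exactly that.
def Pre_remove_even_after_max_no_std (lst : List Int) : Prop := lst ≠ []
instance (lst : List Int) : Decidable (Pre_remove_even_after_max_no_std lst) := by
  unfold Pre_remove_even_after_max_no_std; infer_instance
def pvWitness_remove_even_after_max_no_std : List Int := [1, 2]

def Spec_remove_even_after_max_no_std (lst : List Int) (out : List Int) : Prop := out = remove_even_after_max_no_std_alt lst
instance (lst : List Int) (out : List Int) : Decidable (Spec_remove_even_after_max_no_std lst out) := by unfold Spec_remove_even_after_max_no_std; infer_instance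

-- ===== CLAIM (what is proved, stated in full; the proofs are below) =====
def Claim_equal_remove_even_after_max_no_std : Prop := ∀ (lst : List Int), Dom_remove_even_after_max_no_std lst → Pre_remove_even_after_max_no_std lst → Spec_remove_even_after_max_no_std lst (remove_even_after_max_no_std lst)

-- ===== LEMMAS AND PROOFS =====

/-- A structural view of a Python `for` loop over indices/values of a list. -/
def pvScan {σ : Type} (g : σ → Int → Int → σ) : List Int → Int → σ → σ
  | [], _, s => s
  | x :: r, a, s => pvScan g r (a + 1) (g s a x)

/-- The body of A's max-finding loop. -/
def pvGA (s : Int × Int) (i x : Int) : Int × Int := if x > s.1 then (x, i) else s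

/-- The body of A's building loop (for a fixed max index `m`). -/
def pvGC (m : Int) (acc : List Int) (i x : Int) : List Int :=
  if i ≤ m ∨ (i > m ∧ PySem.Int.mod x 2 ≠ 0) then acc ++ [x] else acc

/-- Python's oddness test. -/
def pvOdd (x : Int) : Bool := decide (PySem.Int.mod x 2 ≠ 0)

/-- Offset (1-based, 0 = none) of the first element of the list strictly exceeding
    every earlier element and `cur`; i.e. position of the first maximum beyond the seed. -/
def pvG : Int → List Int → Nat
  | _, [] => 0
  | cur, x :: r => if x > cur then 1 + pvG x r else (if pvG cur r = 0 then 0 else 1 + pvG cur r)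

/-- The rest of B's computation given current max `cur` and deferred buffer `ta`. -/
def pvF : Int → List Int → List Int → List Int
  | _, ta, [] => ta.filter pvOdd
  | cur, ta, x :: r => if x > cur then ta ++ [x] ++ pvF x [] r else pvF cur (ta ++ [x]) r

lemma pvGetD_append (pre : List Int) (x : Int) (r : List Int) :
    PySem.List.pyGetD (pre ++ x :: r) (pre.length : Int) 0 = x := by
  rw [PySem.List.pyGetD_natCast]
  simp [List.getD, List.getElem?_append_right]

/-- A foldl over `range(a, len(lst))` indexing `lst` equals a structural scan of the suffix. -/
lemma pvFoldlRangeScan {σ : Type} (lst : List Int) (g : σ → Int → Int → σ) :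
    ∀ (t pre : List Int) (s : σ), lst = pre ++ t →
    (PySem.List.pyRange (pre.length : Int) (lst.length : Int) 1).foldl
      (fun s i => g s i (PySem.List.pyGetD lst i 0)) s
    = pvScan g t (pre.length : Int) s := by
  intro t
  induction t with
  | nil =>
    intro pre s h
    subst h
    rw [PySem.List.pyRange_one_eq_nil (by simp)]
    rfl
  | cons x r ih =>
    intro pre s h
    have hlt : (pre.length : Int) < ((lst).length : Int) := by
      subst h; simp
    rw [PySem.List.pyRange_one_cons hlt]
    simp only [List.foldl_cons]
    have hx : PySem.List.pyGetD lst (pre.length : Int) 0 = x := by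
      rw [h]; exact pvGetD_append pre x r
    rw [hx]
    have := ih (pre ++ [x]) (g s (pre.length : Int) x) (by simpa using h)
    simp only [List.length_append, List.length_cons, List.length_nil] at this ⊢
    push_cast at this ⊢
    rw [this]
    rfl

/-- The index computed by A's max scan, in terms of `pvG`. -/
lemma pvScanIdx : ∀ (r : List Int) (pos v idx : Int),
    (pvScan pvGA r pos (v, idx)).2
      = if pvG v r = 0 then idx else pos + (pvG v r : Int) - 1 := by
  intro r
  induction r with
  | nil => intro pos v idx; simp [pvScan, pvG]
  | cons x t ih =>
    intro pos v idx
    simp only [pvScan, pvGA, pvG]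
    by_cases hx : x > v
    · rw [if_pos hx, if_pos hx, ih]
      split_ifs with h0 <;> simp_all <;> push_cast <;> omega
    · rw [if_neg hx, if_neg hx, ih]
      split_ifs with h0 h1 h2 <;> simp_all <;> push_cast <;> omega

/-- Splitting a scan across a list concatenation. -/
lemma pvScanAppend {σ : Type} (g : σ → Int → Int → σ) :
    ∀ (u w : List Int) (a : Int) (s : σ),
    pvScan g (u ++ w) a s = pvScan g w (a + (u.length : Int)) (pvScan g u a s) := by
  intro u
  induction u with
  | nil => intro w a s; simp [pvScan]
  | cons x r ih =>
    intro w a s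
    simp only [List.cons_append, pvScan, List.length_cons, ih]
    congr 1
    push_cast
    ring

/-- While the index stays ≤ m, A's building loop copies elements. -/
lemma pvScanKeep (m : Int) : ∀ (u : List Int) (a : Int) (acc : List Int),
    a + (u.length : Int) ≤ m + 1 → pvScan (pvGC m) u a acc = acc ++ u := by
  intro u
  induction u with
  | nil => intro a acc _; simp [pvScan]
  | cons x r ih =>
    intro a acc h
    simp only [List.length_cons] at h
    push_cast at h
    simp only [pvScan, pvGC]
    rw [if_pos (Or.inl (by omega))]
    rw [ih (a + 1) (acc ++ [x]) (by omega)]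
    simp

/-- Past m, A's building loop filters odd elements. -/
lemma pvScanFilt (m : Int) : ∀ (w : List Int) (a : Int) (acc : List Int), m < a →
    pvScan (pvGC m) w a acc = acc ++ w.filter pvOdd := by
  intro w
  induction w with
  | nil => intro a acc _; simp [pvScan]
  | cons x r ih =>
    intro a acc h
    simp only [pvScan, pvGC]
    by_cases hx : PySem.Int.mod x 2 ≠ 0
    · have hodd : pvOdd x = true := decide_eq_true hx
      rw [if_pos (Or.inr ⟨h, hx⟩), ih (a + 1) (acc ++ [x]) (by omega)]
      simp [List.filter_cons, hodd]
    · have hodd : pvOdd x = false := decide_eq_false hx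
      rw [if_neg (by push Not; push Not at hx; exact ⟨by omega, fun _ => hx⟩),
        ih (a + 1) acc (by omega)]
      simp [List.filter_cons, hodd]

lemma pvG_le (r : List Int) : ∀ (cur : Int), pvG cur r ≤ r.length := by
  induction r with
  | nil => intro cur; simp [pvG]
  | cons x t ih =>
    intro cur
    simp only [pvG, List.length_cons]
    split_ifs with h1 h2
    · have := ih x; omega
    · omega
    · have := ih cur; omega

/-- Characterization of B's remaining computation by a take/drop split at `pvG`. -/
lemma pvF_char : ∀ (r : List Int) (cur : Int) (ta : List Int),
    pvF cur ta r = if pvG cur r = 0 then (ta ++ r).filter pvOdd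
      else ta ++ (r.take (pvG cur r) ++ (r.drop (pvG cur r)).filter pvOdd) := by
  intro r
  induction r with
  | nil => intro cur ta; simp [pvF, pvG]
  | cons x t ih =>
    intro cur ta
    simp only [pvF, pvG]
    by_cases hx : x > cur
    · rw [if_pos hx, if_pos hx, if_neg (by omega), ih x []]
      by_cases h0 : pvG x t = 0
      · simp [h0, Nat.add_comm 1 (pvG x t)]
      · simp only [if_neg h0, List.nil_append]
        rw [Nat.add_comm 1 (pvG x t)]
        simp [List.take_succ_cons, List.drop_succ_cons]
    · rw [if_neg hx, if_neg hx, ih cur (ta ++ [x])]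
      by_cases h0 : pvG cur t = 0
      · simp [h0]
      · simp only [if_neg h0]
        rw [if_neg (by omega : ¬ (1 + pvG cur t) = 0), Nat.add_comm 1 (pvG cur t)]
        simp [List.take_succ_cons, List.drop_succ_cons]

/-- B's fold, started with a consistent odd-buffer, computes `out ++ pvF cur ta r`. -/
lemma pvFoldB : ∀ (r : List Int) (cur : Int) (out ta : List Int),
    ((r.foldl
      (fun (s : Int × List Int × List Int × List Int) x =>
        if x > s.1 then (x, s.2.1 ++ s.2.2.1 ++ [x], ([] : List Int), ([] : List Int))
        else (s.1, s.2.1, s.2.2.1 ++ [x],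
          if PySem.Int.mod x 2 ≠ 0 then s.2.2.2 ++ [x] else s.2.2.2))
      (cur, out, ta, ta.filter pvOdd)).2.1
     ++ (r.foldl
      (fun (s : Int × List Int × List Int × List Int) x =>
        if x > s.1 then (x, s.2.1 ++ s.2.2.1 ++ [x], ([] : List Int), ([] : List Int))
        else (s.1, s.2.1, s.2.2.1 ++ [x],
          if PySem.Int.mod x 2 ≠ 0 then s.2.2.2 ++ [x] else s.2.2.2))
      (cur, out, ta, ta.filter pvOdd)).2.2.2)
    = out ++ pvF cur ta r := by
  intro r
  induction r with
  | nil => intro cur out ta; simp [pvF]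
  | cons x t ih =>
    intro cur out ta
    simp only [List.foldl_cons]
    by_cases hx : x > cur
    · rw [if_pos hx]
      have h := ih x (out ++ ta ++ [x]) []
      simp only [List.filter_nil] at h
      rw [h]
      simp [pvF, hx]
    · rw [if_neg hx]
      have hfa : (if PySem.Int.mod x 2 ≠ 0 then ta.filter pvOdd ++ [x] else ta.filter pvOdd)
          = (ta ++ [x]).filter pvOdd := by
        rcases Decidable.em (PySem.Int.mod x 2 ≠ 0) with he | he
        · have hodd : pvOdd x = true := decide_eq_true he
          rw [if_pos he]; simp [List.filter_append, List.filter_cons, hodd]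
        · have hodd : pvOdd x = false := decide_eq_false he
          rw [if_neg he]; simp [List.filter_append, List.filter_cons, hodd]
      rw [hfa, ih cur out (ta ++ [x])]
      simp [pvF, hx]

-- ===== VERDICT (by name: the statement is the Claim_ definition above) =====
theorem remove_even_after_max_no_std_spec : Claim_equal_remove_even_after_max_no_std := by
  intro lst _ hpre
  unfold Spec_remove_even_after_max_no_std
  match lst, hpre with
  | x :: t, _ =>
    -- notation
    set g := pvG x t with hg
    have hgle : g ≤ t.length := pvG_le t x
    -- ===== A side =====
    have hseed : PySem.List.pyGetD (x :: t) 0 0 = x := PySem.List.pyGetD_zero_cons x t 0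
    have hfold1 :
        ((PySem.List.pyRange 1 ((x :: t).length : Int) 1).foldl
          (fun (s : Int × Int) i =>
            if PySem.List.pyGetD (x :: t) i 0 > s.1 then (PySem.List.pyGetD (x :: t) i 0, i) else s)
          (PySem.List.pyGetD (x :: t) 0 0, 0))
        = pvScan pvGA t 1 (x, 0) := by
      have := pvFoldlRangeScan (x :: t) pvGA t [x] (x, 0) rfl
      simp only [List.length_cons, List.length_nil] at this
      rw [hseed]
      exact this
    have hm : (pvScan pvGA t 1 (x, 0)).2 = (g : Int) := by
      rw [pvScanIdx t 1 x 0]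
      by_cases h0 : pvG x t = 0 <;> simp [h0, ← hg] <;> omega
    have hsplit : x :: t = (x :: t).take (g + 1) ++ (x :: t).drop (g + 1) :=
      (List.take_append_drop _ _).symm
    have hulen : ((x :: t).take (g + 1)).length = g + 1 := by
      simp; omega
    have hA : remove_even_after_max_no_std (x :: t)
        = (x :: t).take (g + 1) ++ ((x :: t).drop (g + 1)).filter pvOdd := by
      show ((PySem.List.pyRange 0 ((x :: t).length : Int) 1).foldl
        (fun (acc : List Int) i => pvGC
          ((PySem.List.pyRange 1 ((x :: t).length : Int) 1).foldl
            (fun (s : Int × Int) i => pvGA s i (PySem.List.pyGetD (x :: t) i 0))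
            (PySem.List.pyGetD (x :: t) 0 0, 0)).2 acc i (PySem.List.pyGetD (x :: t) i 0)) [])
        = _
      rw [show ((PySem.List.pyRange 1 ((x :: t).length : Int) 1).foldl
            (fun (s : Int × Int) i => pvGA s i (PySem.List.pyGetD (x :: t) i 0))
            (PySem.List.pyGetD (x :: t) 0 0, 0)) = pvScan pvGA t 1 (x, 0) from hfold1]
      have h2 := pvFoldlRangeScan (x :: t) (pvGC (pvScan pvGA t 1 (x, 0)).2) (x :: t) [] [] rfl
      simp only [List.length_nil, Nat.cast_zero] at h2
      rw [h2, hm]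
      conv_lhs => rw [hsplit]
      rw [pvScanAppend]
      rw [pvScanKeep (g : Int) _ 0 [] (by rw [hulen]; push_cast; omega)]
      rw [pvScanFilt (g : Int) _ _ _ (by rw [hulen]; push_cast; omega)]
      simp
    -- ===== B side =====
    have hB : remove_even_after_max_no_std_alt (x :: t) = x :: pvF x [] t := by
      simp only [remove_even_after_max_no_std_alt, PySem.List.slice_from_one,
        List.tail_cons, hseed]
      have h := pvFoldB t x [x] []
      simp only [List.filter_nil] at h
      rw [h]
      rfl
    -- ===== combine =====
    rw [hA, hB, pvF_char t x []]
    have htake : (x :: t).take (g + 1) = x :: t.take g := rfl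
    have hdrop : (x :: t).drop (g + 1) = t.drop g := rfl
    rw [htake, hdrop]
    by_cases h0 : g = 0
    · simp [h0, ← hg]
    · rw [if_neg (by rw [← hg]; exact h0)]
      rw [← hg]; simp
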